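-- pv_equiv track=rewrite | github.com/danielanyk/INC | apps/home/report.py | map_types_to_bboxes
-- ===== SOURCE A (Python) =====
-- def map_types_to_bboxes(defect_types, bboxes):
--     """
--     Maps defect types to their corresponding bounding boxes.
--     Ensures grouped defect types (like 'Faded Kerb (1M)' and 'Faded Kerb (2M)') share a combined bounding box.
--     """
--     defect_mapping = {}
--
--     for defect, bbox in zip(defect_types, bboxes):
--         normalized_defect = defect.split(" (")[0].title()  # Remove size (e.g., "(1M)")
--
--         if normalized_defect in defect_mapping:
--             # Merge bounding boxes by taking min/max coordinates
--             existing_bbox = defect_mapping[normalized_defect]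
--             x_min = min(existing_bbox[0], bbox[0])
--             y_min = min(existing_bbox[1], bbox[1])
--             x_max = max(existing_bbox[2], bbox[2])
--             y_max = max(existing_bbox[3], bbox[3])
--             defect_mapping[normalized_defect] = [x_min, y_min, x_max, y_max]
--         else:
--             defect_mapping[normalized_defect] = bbox
--
--     return defect_mapping
-- ===== SOURCE B (Python) =====
-- def _merge(group):
--     merged = group[0]
--     for b in group[1:]:
--         merged = [min(merged[0], b[0]), min(merged[1], b[1]),
--                   max(merged[2], b[2]), max(merged[3], b[3])]
--     return merged
--
--
-- def map_types_to_bboxes(defect_types, bboxes):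
--     """Group bboxes by normalized defect type, then merge each group's extents."""
--     groups = {}
--     for defect, bbox in zip(defect_types, bboxes):
--         key = defect.split(" (")[0].title()
--         groups.setdefault(key, []).append(bbox)
--     return {key: _merge(group) for key, group in groups.items()}
-- ===== Notes on version B (the rewrite author's own statement) =====
-- stated objective: alternative
-- what changed: A merges bboxes into the dict as it scans (conditional in-place min/max update per entry); B first groups all bboxes by normalized defect type with setdefault/append, then builds the result by folding each group once into its merged extent.
import Mathlib
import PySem

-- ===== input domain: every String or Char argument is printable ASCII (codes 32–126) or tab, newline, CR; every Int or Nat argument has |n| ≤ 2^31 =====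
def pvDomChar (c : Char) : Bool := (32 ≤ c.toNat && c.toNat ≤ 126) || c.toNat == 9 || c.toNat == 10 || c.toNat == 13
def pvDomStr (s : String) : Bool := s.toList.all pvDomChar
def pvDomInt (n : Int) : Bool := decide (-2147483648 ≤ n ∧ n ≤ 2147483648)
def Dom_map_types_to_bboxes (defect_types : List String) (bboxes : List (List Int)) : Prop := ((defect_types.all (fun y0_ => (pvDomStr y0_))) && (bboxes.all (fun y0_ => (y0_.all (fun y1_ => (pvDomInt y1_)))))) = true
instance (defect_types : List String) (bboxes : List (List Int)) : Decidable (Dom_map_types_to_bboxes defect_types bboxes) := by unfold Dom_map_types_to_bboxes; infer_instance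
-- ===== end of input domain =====

-- B replaces A's merge-as-you-go dict loop by a group-then-merge decomposition (collect each
-- normalized type's bboxes, then fold each group once); same cost, different structure.

-- ===== PORT A =====
-- shared helper: Python's `s.title()` on the ASCII domain — a letter is uppercased after a
-- non-letter and lowercased after a letter (exact for the Dom_ character set).
def pvTitleGo : Bool → List Char → List Char
  | _, [] => []
  | prev, c :: cs =>
      (if PySem.Chars.isalpha c then
         (if prev then PySem.Chars.lowerChar c else PySem.Chars.upperChar c)
       else c) :: pvTitleGo (PySem.Chars.isalpha c) cs

-- shared helper: `defect.split(" (")[0].title()` (both Pythons write this expression verbatim)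
def pvNorm (s : String) : String :=
  String.ofList (pvTitleGo false ((PySem.Chars.splitOn s.toList [' ', '(']).headD []))

-- shared helper: the min/max merge of two bboxes both Pythons write; indices 0..3 exist on every
-- input Pre_ admits, so the 0 default of pyGetD is never read inside the claim.
def pvMerge4 (a b : List Int) : List Int :=
  [min (PySem.List.pyGetD a 0 0) (PySem.List.pyGetD b 0 0),
   min (PySem.List.pyGetD a 1 0) (PySem.List.pyGetD b 1 0),
   max (PySem.List.pyGetD a 2 0) (PySem.List.pyGetD b 2 0),
   max (PySem.List.pyGetD a 3 0) (PySem.List.pyGetD b 3 0)]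

def map_types_to_bboxes (defect_types : List String) (bboxes : List (List Int)) : List (String × List Int) :=
  ((defect_types.zip bboxes).foldl
    (fun d p =>
      let nd := pvNorm p.1
      d.insert nd (if d.contains nd then pvMerge4 (d.getD nd []) p.2 else p.2))
    PySem.Dict.empty).items

-- ===== PORT B =====
-- `_merge`: merged = group[0], then fold the merge over group[1:] ([] is unreachable: groups are nonempty)
def pvMergeGroup : List (List Int) → List Int
  | [] => []
  | b :: rest => rest.foldl pvMerge4 b

def map_types_to_bboxes_alt (defect_types : List String) (bboxes : List (List Int)) : List (String × List Int) :=
  let groups := (defect_types.zip bboxes).foldl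
    (fun d p => d.modify (pvNorm p.1) [] (· ++ [p.2])) PySem.Dict.empty
  (groups.items.foldl
    (fun r kg => r.insert kg.1 (pvMergeGroup kg.2)) PySem.Dict.empty).items

-- ===== PRECONDITION & SPEC =====
-- Pre_ excludes exactly the inputs on which Python A raises IndexError: a bbox with fewer than 4
-- coordinates whose normalized defect type occurs at least twice in the zipped input (B raises there too).
-- (keyed by the lowercased prefix: `x.title() = y.title()` iff `x.lower() = y.lower()`)
def Pre_map_types_to_bboxes (defect_types : List String) (bboxes : List (List Int)) : Prop :=
  ∀ p ∈ defect_types.zip bboxes,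
    2 ≤ ((defect_types.zip bboxes).map
          (fun q => PySem.Chars.lower ((PySem.Chars.splitOn q.1.toList [' ', '(']).headD []))).count
        (PySem.Chars.lower ((PySem.Chars.splitOn p.1.toList [' ', '(']).headD [])) →
    4 ≤ p.2.length

instance (defect_types : List String) (bboxes : List (List Int)) : Decidable (Pre_map_types_to_bboxes defect_types bboxes) := by unfold Pre_map_types_to_bboxes; infer_instance

def pvWitness_map_types_to_bboxes : List String × List (List Int) :=
  (["Faded Kerb (1M)", "faded kerb (2M)", "Pothole"],
   [[0, 0, 10, 10], [5, 5, 20, 20], [1, 2, 3, 4]])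

def Spec_map_types_to_bboxes (defect_types : List String) (bboxes : List (List Int)) (out : List (String × List Int)) : Prop := out = map_types_to_bboxes_alt defect_types bboxes
instance (defect_types : List String) (bboxes : List (List Int)) (out : List (String × List Int)) : Decidable (Spec_map_types_to_bboxes defect_types bboxes out) := by unfold Spec_map_types_to_bboxes; infer_instance

-- ===== CLAIM (what is proved, stated in full; the proofs are below) =====
def Claim_equal_map_types_to_bboxes : Prop := ∀ (defect_types : List String) (bboxes : List (List Int)), Dom_map_types_to_bboxes defect_types bboxes → Pre_map_types_to_bboxes defect_types bboxes → Spec_map_types_to_bboxes defect_types bboxes (map_types_to_bboxes defect_types bboxes)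

-- ===== LEMMAS AND PROOFS =====

-- A's running value at one key, as a function of the bboxes filed under that key so far
def pvF : Option (List Int) → List (List Int) → Option (List Int)
  | o, [] => o
  | none, b :: r => pvF (some b) r
  | some a, b :: r => pvF (some (pvMerge4 a b)) r

theorem pvF_some (r : List (List Int)) : ∀ a, pvF (some a) r = some (r.foldl pvMerge4 a) := by
  induction r with
  | nil => intro a; rfl
  | cons b r ih => intro a; simpa [pvF] using ih (pvMerge4 a b)

-- A's dict after the loop, looked up at any key c
theorem pvGetA (l : List (String × List Int)) :
    ∀ (d : PySem.Dict String (List Int)) (c : String),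
      (l.foldl (fun d p => d.insert p.1 (if d.contains p.1 then pvMerge4 (d.getD p.1 []) p.2 else p.2)) d).get? c
        = pvF (d.get? c) ((l.filter (fun p => p.1 == c)).map (·.2)) := by
  induction l with
  | nil => intro d c; rfl
  | cons p l ih =>
      intro d c
      by_cases h : p.1 = c
      · subst h
        simp only [List.foldl_cons, ih, List.filter_cons, BEq.rfl, if_true, List.map_cons]
        rw [PySem.Dict.get?_insert_self]
        rw [PySem.Dict.contains_eq_isSome_get?, PySem.Dict.getD_eq_get?_getD]
        cases hd : d.get? p.1 <;> simp [pvF]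
      · have hne : c ≠ p.1 := fun hc => h hc.symm
        simp only [List.foldl_cons, ih, List.filter_cons]
        rw [PySem.Dict.get?_insert_of_ne _ _ hne]
        simp [show (p.1 == c) = false from beq_false_of_ne h]

theorem map_types_to_bboxes_spec : Claim_equal_map_types_to_bboxes := by
  unfold Claim_equal_map_types_to_bboxes
  intro defect_types bboxes _ _
  unfold Spec_map_types_to_bboxes map_types_to_bboxes map_types_to_bboxes_alt
  -- fold over the zipped pairs pre-keyed by pvNorm
  set l : List (String × List Int) :=
    (defect_types.zip bboxes).map (fun p => (pvNorm p.1, p.2)) with hl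
  have hA : (defect_types.zip bboxes).foldl
      (fun d p =>
        let nd := pvNorm p.1
        d.insert nd (if d.contains nd then pvMerge4 (d.getD nd []) p.2 else p.2))
      PySem.Dict.empty
      = l.foldl (fun d p => d.insert p.1 (if d.contains p.1 then pvMerge4 (d.getD p.1 []) p.2 else p.2)) PySem.Dict.empty := by
    rw [hl, List.foldl_map]
  have hG : (defect_types.zip bboxes).foldl
      (fun d p => d.modify (pvNorm p.1) [] (· ++ [p.2])) PySem.Dict.empty
      = l.foldl (fun d p => d.modify p.1 [] (· ++ [p.2])) PySem.Dict.empty := by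
    rw [hl, List.foldl_map]
  rw [hA, hG]
  set dA := l.foldl (fun d p => d.insert p.1 (if d.contains p.1 then pvMerge4 (d.getD p.1 []) p.2 else p.2)) PySem.Dict.empty with hdA
  set g := l.foldl (fun d p => d.modify p.1 [] (· ++ [p.2])) PySem.Dict.empty with hg
  -- B's second loop inserts the (distinct, fresh) group keys in order: it maps over g.items
  have hgnodup : g.keys.Nodup := by
    rw [hg]
    exact PySem.Dict.nodup_keys_foldl_modify_key l Prod.fst [] _ _ PySem.Dict.nodup_keys_empty
  have hres : (g.items.foldl (fun r kg => r.insert kg.1 (pvMergeGroup kg.2)) PySem.Dict.empty).items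
      = g.items.map (fun kg => (kg.1, pvMergeGroup kg.2)) := by
    have := PySem.Dict.items_foldl_insert_fresh (l := g.items) (k := Prod.fst)
      (v := fun kg => pvMergeGroup kg.2) (d := PySem.Dict.empty)
      (by intro a _; exact PySem.Dict.contains_empty _) (by simpa [PySem.Dict.keys] using hgnodup)
    simpa using this
  rw [hres]
  -- both dicts carry the same (nodup) key list
  have hAnodup : dA.keys.Nodup := by
    rw [hdA]
    exact PySem.Dict.nodup_keys_foldl_insert_key l Prod.fst _ _ PySem.Dict.nodup_keys_empty
  have hkeys : dA.keys = g.keys := by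
    rw [hdA, hg, PySem.Dict.keys_foldl_insert_key, PySem.Dict.keys_foldl_modify_key]
    rfl
  rw [PySem.Dict.items_eq_map_keys dA hAnodup [], PySem.Dict.items_eq_map_keys g hgnodup [],
      List.map_map, hkeys]
  apply List.map_congr_left
  intro k hk
  -- k has at least one entry in l
  have hkmem : k ∈ l.map Prod.fst := by
    have hkeys2 : g.keys = PySem.Set.ofList (l.map Prod.fst) := by
      rw [hg, PySem.Dict.keys_foldl_modify_key]; rfl
    rw [hkeys2] at hk
    exact (PySem.Set.mem_ofList _ _).mp hk
  have hfilter : (l.filter (fun p => p.1 == k)).map (·.2) ≠ [] := by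
    rcases List.mem_map.mp hkmem with ⟨p, hp, hpk⟩
    have hpf : p ∈ l.filter (fun p => p.1 == k) := List.mem_filter.mpr ⟨hp, by simp [hpk]⟩
    cases hfe : l.filter (fun p => p.1 == k) with
    | nil => rw [hfe] at hpf; simp at hpf
    | cons q t => simp
  have hgval : g.getD k [] = (l.filter (fun p => p.1 == k)).map (·.2) := by
    rw [hg]
    simpa using PySem.Dict.getD_foldl_modify_append (l := l) (d := PySem.Dict.empty) (c := k)
  have hAval : dA.get? k = pvF none ((l.filter (fun p => p.1 == k)).map (·.2)) := by
    rw [hdA, pvGetA]; rfl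
  cases hfl : (l.filter (fun p => p.1 == k)).map (·.2) with
  | nil => exact absurd hfl hfilter
  | cons b r =>
      have hAv : dA.getD k [] = r.foldl pvMerge4 b := by
        rw [PySem.Dict.getD_eq_get?_getD, hAval, hfl]
        simp [pvF, pvF_some]
      simp only [Function.comp_apply]
      rw [hgval, hfl, hAv]
      simp [pvMergeGroup]
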